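-- pv_equiv track=rewrite | github.com/soushirou96/LMArena-to-api | scripts/docker_browser_runner.py | patch_userscript_for_docker
-- ===== SOURCE A (Python) =====
-- def patch_userscript_for_docker(raw_js: str) -> str:
--     """
--     将 userscript 与 polyfills 一起包裹在域名守卫 IIFE 中，并把 localhost/127.0.0.1 改写为 host.docker.internal，
--     确保仅在 *.lmarena.ai 下执行，且容器内可访问宿主机服务。
--     """
--     patched = raw_js
--     replace_pairs = [
--         ("ws://localhost:5102", "ws://host.docker.internal:5102"),
--         ("ws://127.0.0.1:5102", "ws://host.docker.internal:5102"),
--         ("http://localhost:5102", "http://host.docker.internal:5102"),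
--         ("http://127.0.0.1:5102", "http://host.docker.internal:5102"),
--         ("http://localhost:5103", "http://host.docker.internal:5103"),
--         ("http://127.0.0.1:5103", "http://host.docker.internal:5103"),
--     ]
--     for a, b in replace_pairs:
--         patched = patched.replace(a, b)
--
--     wrapper = f"""
-- ;(function() {{
--   try {{
--     var host = location.hostname || "";
--     if (!/lmarena\\.ai$/i.test(host) && !/\\.lmarena\\.ai$/i.test(host)) return;
--   }} catch (e) {{}}
--   {patched}
-- }})();
-- """
--     return wrapper
-- ===== SOURCE B (Python) =====
-- import re
--
-- _URL_RE = re.compile(r"(?:ws|http)://(?:localhost|127\.0\.0\.1):5102|http://(?:localhost|127\.0\.0\.1):5103")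
--
--
-- def _to_docker_host(match):
--     url = match.group(0)
--     if url.startswith("ws"):
--         return "ws://host.docker.internal:5102"
--     return "http://host.docker.internal:" + url[-4:]
--
--
-- def patch_userscript_for_docker(raw_js: str) -> str:
--     patched = _URL_RE.sub(_to_docker_host, raw_js)
--     wrapper = f"""
-- ;(function() {{
--   try {{
--     var host = location.hostname || "";
--     if (!/lmarena\\.ai$/i.test(host) && !/\\.lmarena\\.ai$/i.test(host)) return;
--   }} catch (e) {{}}
--   {patched}
-- }})();
-- """
--     return wrapper
-- ===== Notes on version B (the rewrite author's own statement) =====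
-- stated objective: idiomatic
-- what changed: The six sequential full-string str.replace passes are replaced by a single left-to-right pass: one compiled regex matching exactly the allowed scheme/host/port combinations (ws/http for :5102, http only for :5103) with a callback that swaps the host for host.docker.internal.
import Mathlib
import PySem

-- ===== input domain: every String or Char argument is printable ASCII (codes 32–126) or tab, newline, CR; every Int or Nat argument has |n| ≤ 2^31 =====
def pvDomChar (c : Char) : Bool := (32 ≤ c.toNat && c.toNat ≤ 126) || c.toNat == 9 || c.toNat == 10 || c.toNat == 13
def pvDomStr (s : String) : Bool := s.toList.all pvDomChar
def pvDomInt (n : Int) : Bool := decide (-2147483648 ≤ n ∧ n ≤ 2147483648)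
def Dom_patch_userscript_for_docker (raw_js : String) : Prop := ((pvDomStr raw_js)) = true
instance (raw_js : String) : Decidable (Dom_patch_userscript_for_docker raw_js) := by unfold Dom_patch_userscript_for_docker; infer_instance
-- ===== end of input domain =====

-- B replaces A's six sequential full-string str.replace passes by one left-to-right scan
-- (a compiled regex of the six literal URLs with a host-swapping callback); same return value.

-- ===== PORT A =====
-- literal transliteration of A: six s.replace passes (PySem.Str.replace), then the wrapper.
def patch_userscript_for_docker (raw_js : String) : String :=
  let replace_pairs : List (String × String) :=
    [("ws://localhost:5102", "ws://host.docker.internal:5102"),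
     ("ws://127.0.0.1:5102", "ws://host.docker.internal:5102"),
     ("http://localhost:5102", "http://host.docker.internal:5102"),
     ("http://127.0.0.1:5102", "http://host.docker.internal:5102"),
     ("http://localhost:5103", "http://host.docker.internal:5103"),
     ("http://127.0.0.1:5103", "http://host.docker.internal:5103")]
  let patched := replace_pairs.foldl (fun acc pr => PySem.Str.replace acc pr.1 pr.2) raw_js
  "\n;(function() {\n  try {\n    var host = location.hostname || \"\";\n    if (!/lmarena\\.ai$/i.test(host) && !/\\.lmarena\\.ai$/i.test(host)) return;\n  } catch (e) {}\n  "
    ++ patched ++ "\n})();\n"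

-- ===== PORT B =====
-- B uses re.sub with an alternation of six fixed literal URLs and a replacement callback.
-- No PySem regex exists, so re.sub is ported by hand, exactly for this pattern: the
-- alternation matches precisely the six literals below; re.sub scans left to right and at
-- each position tries the alternatives in the pattern's order (first match wins), emits the
-- callback's value for the matched text and resumes after it, otherwise copies one character.

-- the six literals of B's regex, in alternation order
def pvLits : List (List Char) :=
  ["ws://localhost:5102".toList, "ws://127.0.0.1:5102".toList,
   "http://localhost:5102".toList, "http://127.0.0.1:5102".toList,
   "http://localhost:5103".toList, "http://127.0.0.1:5103".toList]

-- _to_docker_host: B's replacement callback on the matched text (url[-4:] = slice from -4)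
def pvRepl (url : List Char) : List Char :=
  if PySem.Chars.startswith url "ws".toList then "ws://host.docker.internal:5102".toList
  else "http://host.docker.internal:".toList ++ PySem.List.slice url (some (-4)) none

-- the left-to-right scan of re.sub; fuel = number of characters still to scan (each step
-- consumes at least one character, so s.length fuel is exact for these non-empty literals)
def pvScanGo (ps : List (List Char × List Char)) : Nat → List Char → List Char
  | 0, l => l
  | _ + 1, [] => []
  | f + 1, c :: t =>
    match ps.find? (fun pr => pr.1.isPrefixOf (c :: t)) with
    | some pr => pr.2 ++ pvScanGo ps f ((c :: t).drop pr.1.length)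
    | none => c :: pvScanGo ps f t

def pvScan (ps : List (List Char × List Char)) (s : List Char) : List Char :=
  pvScanGo ps s.length s

def patch_userscript_for_docker_alt (raw_js : String) : String :=
  let patched := String.ofList (pvScan (pvLits.map (fun l => (l, pvRepl l))) raw_js.toList)
  "\n;(function() {\n  try {\n    var host = location.hostname || \"\";\n    if (!/lmarena\\.ai$/i.test(host) && !/\\.lmarena\\.ai$/i.test(host)) return;\n  } catch (e) {}\n  "
    ++ patched ++ "\n})();\n"

-- ===== PRECONDITION & SPEC =====
def Spec_patch_userscript_for_docker (raw_js : String) (out : String) : Prop := out = patch_userscript_for_docker_alt raw_js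
instance (raw_js : String) (out : String) : Decidable (Spec_patch_userscript_for_docker raw_js out) := by unfold Spec_patch_userscript_for_docker; infer_instance

-- ===== CLAIM (what is proved, stated in full; the proofs are below) =====
def Claim_equal_patch_userscript_for_docker : Prop := ∀ (raw_js : String), Dom_patch_userscript_for_docker raw_js → Spec_patch_userscript_for_docker raw_js (patch_userscript_for_docker raw_js)

-- ===== LEMMAS AND PROOFS =====

-- `SepL a p`: no occurrence of `p` can start inside `a` (fully inside or hanging over the
-- right end).  Decidable, so concrete instances are discharged by `decide`.
abbrev SepL (a p : List Char) : Prop :=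
  ∀ k, k < a.length → ¬ p <+: a.drop k ∧ ¬ a.drop k <+: p

abbrev FineT (ps : List (List Char × List Char)) : Prop := ∀ pr ∈ ps, pr.1 ≠ []

lemma prefix_append_cases {p a x : List Char} (h : p <+: a ++ x) : p <+: a ∨ a <+: p := by
  obtain ⟨t, ht⟩ := h
  rcases List.append_eq_append_iff.1 ht with ⟨as, ha, -⟩ | ⟨bs, hb, -⟩
  · exact Or.inl ⟨as, ha.symm⟩
  · exact Or.inr ⟨bs, hb.symm⟩

-- ---- equations for PySem.Chars.replace (old ≠ []) ----

lemma go_acc (old new : List Char) :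
    ∀ (f : Nat) (l acc : List Char),
      PySem.Chars.replace.go old new f l acc = acc.reverse ++ PySem.Chars.replace.go old new f l [] := by
  intro f
  induction f with
  | zero => intro l acc; simp [PySem.Chars.replace.go]
  | succ f ih =>
    intro l acc
    cases l with
    | nil => simp [PySem.Chars.replace.go]
    | cons c t =>
      rw [PySem.Chars.replace.go, PySem.Chars.replace.go]
      split
      · rw [ih _ (new.reverse ++ acc), ih _ (new.reverse ++ ([] : List Char))]
        simp
      · rw [ih _ (c :: acc), ih _ (c :: ([] : List Char))]
        simp

lemma go_fuel (old new : List Char) (hold : old ≠ []) :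
    ∀ (f₁ : Nat) (f₂ : Nat) (l acc : List Char), l.length ≤ f₁ → l.length ≤ f₂ →
      PySem.Chars.replace.go old new f₁ l acc = PySem.Chars.replace.go old new f₂ l acc := by
  intro f₁
  induction f₁ with
  | zero =>
    intro f₂ l acc h1 _
    have : l = [] := List.eq_nil_of_length_eq_zero (Nat.le_zero.1 h1)
    subst this
    cases f₂ <;> simp [PySem.Chars.replace.go]
  | succ f ih =>
    intro f₂ l acc h1 h2
    cases l with
    | nil =>
      cases f₂ <;> simp [PySem.Chars.replace.go]
    | cons c t =>
      cases f₂ with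
      | zero => simp at h2
      | succ f₂ =>
        have hlen : 1 ≤ old.length := by
          cases old with
          | nil => exact absurd rfl hold
          | cons _ _ => simp
        rw [PySem.Chars.replace.go, PySem.Chars.replace.go]
        split
        · apply ih <;>
            (simp only [List.length_drop, List.length_cons] at *; omega)
        · apply ih <;> (simp only [List.length_cons] at *; omega)

lemma replace_eq_go (s old new : List Char) (hold : old ≠ []) :
    PySem.Chars.replace s old new = PySem.Chars.replace.go old new s.length s [] := by
  rw [PySem.Chars.replace]
  simp [List.isEmpty_iff, hold]

lemma replace_nil (old new : List Char) (hold : old ≠ []) :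
    PySem.Chars.replace [] old new = [] := by
  rw [replace_eq_go _ _ _ hold]
  simp [PySem.Chars.replace.go]

lemma replace_cons (old new : List Char) (hold : old ≠ []) (c : Char) (t : List Char)
    (h : ¬ old <+: (c :: t)) :
    PySem.Chars.replace (c :: t) old new = c :: PySem.Chars.replace t old new := by
  rw [replace_eq_go _ _ _ hold, replace_eq_go _ _ _ hold]
  show PySem.Chars.replace.go old new (t.length + 1) (c :: t) [] = _
  rw [PySem.Chars.replace.go]
  have : old.isPrefixOf (c :: t) = false := by
    rw [Bool.eq_false_iff]
    intro hb
    exact h (List.isPrefixOf_iff_prefix.1 hb)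
  rw [if_neg (by simp [this])]
  rw [go_acc]
  simp

lemma replace_pref (old new x : List Char) (hold : old ≠ []) :
    PySem.Chars.replace (old ++ x) old new = new ++ PySem.Chars.replace x old new := by
  cases old with
  | nil => exact absurd rfl hold
  | cons o ot =>
    rw [replace_eq_go _ _ _ hold, replace_eq_go _ _ _ hold]
    have hL : ((o :: ot) ++ x).length = (ot.length + x.length) + 1 := by simp
    rw [hL, List.cons_append, PySem.Chars.replace.go]
    have hpre : (o :: ot).isPrefixOf (o :: (ot ++ x)) = true :=
      List.isPrefixOf_iff_prefix.2 ⟨x, by simp⟩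
    rw [if_pos hpre]
    have hdrop : (o :: (ot ++ x)).drop (o :: ot).length = x := by
      have := List.drop_left (l₁ := o :: ot) (l₂ := x)
      simpa using this
    rw [hdrop, go_acc]
    simp only [List.append_nil, List.reverse_reverse]
    congr 1
    exact go_fuel (o :: ot) new hold _ _ x [] (by omega) (by omega)

lemma replace_passthrough (old new : List Char) (hold : old ≠ []) :
    ∀ (a x : List Char), SepL a old →
      PySem.Chars.replace (a ++ x) old new = a ++ PySem.Chars.replace x old new := by
  intro a
  induction a with
  | nil => intro x _; simp
  | cons c a' ih =>
    intro x hsep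
    have h0 := hsep 0 (by simp)
    have hnp : ¬ old <+: (c :: a') ++ x := by
      intro h
      rcases prefix_append_cases h with h | h
      · exact h0.1 (by simpa using h)
      · exact h0.2 (by simpa using h)
    rw [List.cons_append, replace_cons old new hold _ _ (by simpa using hnp)]
    rw [ih x (fun k hk => by simpa using hsep (k + 1) (by simpa using hk))]
    simp

-- ---- equations for the scan ----

lemma scanGo_fuel (ps : List (List Char × List Char)) (hf : FineT ps) :
    ∀ (f : Nat) (l : List Char), l.length ≤ f → pvScanGo ps f l = pvScanGo ps l.length l := by
  intro f
  induction f using Nat.strong_induction_on with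
  | _ f ih =>
    intro l h
    match f, l with
    | 0, l =>
      have : l = [] := List.eq_nil_of_length_eq_zero (Nat.le_zero.1 h)
      subst this; rfl
    | f + 1, [] => simp [pvScanGo]
    | f + 1, c :: t =>
      show pvScanGo ps (f + 1) (c :: t) = pvScanGo ps (t.length + 1) (c :: t)
      rw [pvScanGo, pvScanGo]
      cases hfind : ps.find? (fun pr => pr.1.isPrefixOf (c :: t)) with
      | none =>
        simp only
        have ht : t.length ≤ f := by simp at h; omega
        rw [ih f (by omega) t ht]
      | some pr =>
        simp only
        have hne := hf pr (List.mem_of_find?_eq_some hfind)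
        have hlen : 1 ≤ pr.1.length := by
          cases hpr : pr.1 with
          | nil => exact absurd hpr hne
          | cons _ _ => simp
        have hd : ((c :: t).drop pr.1.length).length ≤ t.length := by
          simp only [List.length_drop]
          simp
          omega
        have ht : t.length ≤ f := by simp at h; omega
        rw [ih f (by omega) _ (le_trans hd ht), ih t.length (by omega) _ hd]

lemma scan_nil (ps : List (List Char × List Char)) : pvScan ps [] = [] := rfl

lemma scan_cons_none (ps : List (List Char × List Char)) (c : Char) (t : List Char)
    (h : ps.find? (fun pr => pr.1.isPrefixOf (c :: t)) = none) :
    pvScan ps (c :: t) = c :: pvScan ps t := by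
  show pvScanGo ps (t.length + 1) (c :: t) = _
  rw [pvScanGo, h]
  rfl

lemma scan_cons_some (ps : List (List Char × List Char)) (hf : FineT ps) (c : Char)
    (t : List Char) (pr : List Char × List Char)
    (h : ps.find? (fun qr => qr.1.isPrefixOf (c :: t)) = some pr) :
    pvScan ps (c :: t) = pr.2 ++ pvScan ps ((c :: t).drop pr.1.length) := by
  show pvScanGo ps (t.length + 1) (c :: t) = _
  rw [pvScanGo, h]
  simp only
  have hne := hf pr (List.mem_of_find?_eq_some h)
  have hlen : 1 ≤ pr.1.length := by
    cases hpr : pr.1 with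
    | nil => exact absurd hpr hne
    | cons _ _ => simp
  have hd : ((c :: t).drop pr.1.length).length ≤ t.length := by
    simp only [List.length_drop]; simp; omega
  rw [scanGo_fuel ps hf t.length _ hd]
  rfl

-- a pattern-free block passes through the scan unchanged
lemma scan_passthrough (ps : List (List Char × List Char)) (_hf : FineT ps) :
    ∀ (a x : List Char), (∀ pr ∈ ps, SepL a pr.1) →
      pvScan ps (a ++ x) = a ++ pvScan ps x := by
  intro a
  induction a with
  | nil => intro x _; simp
  | cons c a' ih =>
    intro x hsep
    have hnone : ps.find? (fun pr => pr.1.isPrefixOf ((c :: a') ++ x)) = none := by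
      rw [List.find?_eq_none]
      intro pr hpr hb
      have hp : pr.1 <+: (c :: a') ++ x := List.isPrefixOf_iff_prefix.1 hb
      have h0 := hsep pr hpr 0 (by simp)
      rcases prefix_append_cases hp with h | h
      · exact h0.1 (by simpa using h)
      · exact h0.2 (by simpa using h)
    rw [List.cons_append, scan_cons_none ps _ _ (by simpa using hnone)]
    rw [ih x (fun pr hpr k hk => by simpa using hsep pr hpr (k + 1) (by simpa using hk))]
    simp

-- a (suffix of the) new pattern occurs in the scan's output only where it occurred in the input
lemma scan_nopref (ps : List (List Char × List Char)) (hf : FineT ps) (p : List Char)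
    (hsep : ∀ pr ∈ ps, SepL p pr.2) :
    ∀ (l : List Char) (d : Nat), d ≤ p.length → p.drop d <+: pvScan ps l → p.drop d <+: l := by
  intro l
  induction hl : l.length using Nat.strong_induction_on generalizing l with
  | _ n ih =>
    subst hl
    intro d hd hpre
    rcases Nat.lt_or_ge d p.length with hdlt | hdge
    swap
    · have : p.drop d = [] := List.drop_eq_nil_of_le hdge
      rw [this]; exact List.nil_prefix
    cases l with
    | nil =>
      rw [scan_nil] at hpre
      have hnil : p.drop d = [] := List.prefix_nil.1 hpre
      simp [hnil]
    | cons c t =>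
      cases hfind : ps.find? (fun pr => pr.1.isPrefixOf (c :: t)) with
      | some pr =>
        rw [scan_cons_some ps hf c t pr hfind] at hpre
        have h := hsep pr (List.mem_of_find?_eq_some hfind) d hdlt
        rcases prefix_append_cases hpre with hx | hx
        · exact absurd hx h.2
        · exact absurd hx h.1
      | none =>
        rw [scan_cons_none ps c t hfind] at hpre
        have hdc : p.drop d = p[d] :: p.drop (d + 1) := List.drop_eq_getElem_cons hdlt
        rw [hdc] at hpre
        rcases List.cons_prefix_cons.1 hpre with ⟨hc, ht⟩
        have ht' : p.drop (d + 1) <+: t :=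
          ih t.length (by simp) t rfl (d + 1) (by omega) ht
        rw [hdc, hc]
        exact List.cons_prefix_cons.2 ⟨rfl, ht'⟩

-- one replace pass over the scan of the previous patterns = the scan with the pattern added
lemma step (prev : List (List Char × List Char)) (cur : List Char × List Char)
    (hfine : FineT prev) (hcur : cur.1 ≠ [])
    (h2 : ∀ pr ∈ prev, SepL pr.2 cur.1)
    (h3 : ∀ pr ∈ prev, SepL cur.1 pr.1)
    (h4 : ∀ pr ∈ prev, SepL cur.1 pr.2) :
    ∀ l, PySem.Chars.replace (pvScan prev l) cur.1 cur.2 = pvScan (prev ++ [cur]) l := by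
  intro l
  induction hl : l.length using Nat.strong_induction_on generalizing l with
  | _ n ih =>
    subst hl
    have hfine' : FineT (prev ++ [cur]) := by
      intro pr hpr
      rcases List.mem_append.1 hpr with h | h
      · exact hfine pr h
      · simp at h; subst h; exact hcur
    cases l with
    | nil => rw [scan_nil, scan_nil, replace_nil _ _ hcur]
    | cons c t =>
      cases hfind : prev.find? (fun pr => pr.1.isPrefixOf (c :: t)) with
      | some pr =>
        have hmem := List.mem_of_find?_eq_some hfind
        have hne := hfine pr hmem
        have hlen : 1 ≤ pr.1.length := by
          cases hpr : pr.1 with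
          | nil => exact absurd hpr hne
          | cons _ _ => simp
        rw [scan_cons_some prev hfine c t pr hfind]
        rw [replace_passthrough cur.1 cur.2 hcur _ _ (h2 pr hmem)]
        have hdrop : ((c :: t).drop pr.1.length).length < t.length + 1 := by
          simp only [List.length_drop]; simp; omega
        rw [ih _ hdrop _ rfl]
        have hfind' : (prev ++ [cur]).find? (fun qr => qr.1.isPrefixOf (c :: t)) = some pr := by
          rw [List.find?_append, hfind]; rfl
        rw [scan_cons_some (prev ++ [cur]) hfine' c t pr hfind']
      | none =>
        by_cases hc : cur.1 <+: (c :: t)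
        · obtain ⟨x, hx⟩ := hc
          have hmatchlist : ∀ pr ∈ prev, SepL cur.1 pr.1 := h3
          rw [← hx]
          rw [scan_passthrough prev hfine cur.1 x hmatchlist]
          rw [replace_pref cur.1 cur.2 _ hcur]
          have hxlen : x.length < (c :: t).length := by
            rw [← hx]
            have : 1 ≤ cur.1.length := by
              cases hq : cur.1 with
              | nil => exact absurd hq hcur
              | cons _ _ => simp
            simp
            omega
          rw [ih x.length (by simpa using hxlen) x rfl]
          have hfind' : (prev ++ [cur]).find? (fun qr => qr.1.isPrefixOf (cur.1 ++ x)) = some cur := by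
            rw [List.find?_append]
            have h1 : prev.find? (fun qr => qr.1.isPrefixOf (cur.1 ++ x)) = none := by
              rw [hx]; exact hfind
            rw [h1]
            simp [List.isPrefixOf_iff_prefix]
          have := scan_cons_some (prev ++ [cur]) hfine'
          -- rewrite cur.1 ++ x in cons form to apply scan_cons_some
          cases hq : cur.1 with
          | nil => exact absurd hq hcur
          | cons q qt =>
            have hx' : (q :: qt) ++ x = c :: t := by rw [← hq, hx]
            have hfind'' : (prev ++ [cur]).find? (fun qr => qr.1.isPrefixOf (q :: (qt ++ x))) = some cur := by
              have := hfind'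
              rw [hq] at this
              simpa using this
            have := scan_cons_some (prev ++ [cur]) hfine' q (qt ++ x) cur hfind''
            simp only [List.cons_append] at this ⊢
            rw [this]
            congr 1
            congr 1
            rw [hq]
            simp only [List.length_cons]
            show x = (q :: (qt ++ x)).drop (qt.length + 1)
            have h2 : (q :: (qt ++ x)).drop (qt.length + 1) = x := by
              have := List.drop_left (l₁ := q :: qt) (l₂ := x)
              simpa using this
            exact h2.symm
        · -- cur does not match either: both scans copy c
          rw [scan_cons_none prev c t hfind]
          have hnp : ¬ cur.1 <+: c :: pvScan prev t := by
            intro h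
            cases hq : cur.1 with
            | nil => exact absurd hq hcur
            | cons q qt =>
              rw [hq] at h
              rcases List.cons_prefix_cons.1 h with ⟨hqc, hqt⟩
              have : qt <+: t := by
                have hqt' : cur.1.drop 1 <+: pvScan prev t := by simpa [hq] using hqt
                have := scan_nopref prev hfine cur.1 h4 t 1
                  (by rw [hq]; simp) hqt'
                simpa [hq] using this
              exact hc (by rw [hq, hqc]; exact List.cons_prefix_cons.2 ⟨rfl, this⟩)
          rw [replace_cons _ _ hcur _ _ hnp]
          rw [ih t.length (by simp) t rfl]
          have hfind' : (prev ++ [cur]).find? (fun qr => qr.1.isPrefixOf (c :: t)) = none := by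
            rw [List.find?_append, hfind]
            simp [List.isPrefixOf_iff_prefix, hc]
          rw [scan_cons_none (prev ++ [cur]) c t hfind']

lemma scan_empty : ∀ l, pvScan [] l = l := by
  intro l
  induction l with
  | nil => rfl
  | cons c t ih =>
    rw [scan_cons_none [] c t (by simp), ih]

lemma table_eval : pvLits.map (fun l => (l, pvRepl l)) = [("ws://localhost:5102".toList, "ws://host.docker.internal:5102".toList), ("ws://127.0.0.1:5102".toList, "ws://host.docker.internal:5102".toList), ("http://localhost:5102".toList, "http://host.docker.internal:5102".toList), ("http://127.0.0.1:5102".toList, "http://host.docker.internal:5102".toList), ("http://localhost:5103".toList, "http://host.docker.internal:5103".toList), ("http://127.0.0.1:5103".toList, "http://host.docker.internal:5103".toList)] := by decide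

lemma chain_eq (cs : List Char) :
    PySem.Chars.replace (PySem.Chars.replace (PySem.Chars.replace (PySem.Chars.replace (PySem.Chars.replace (PySem.Chars.replace (cs) "ws://localhost:5102".toList "ws://host.docker.internal:5102".toList) "ws://127.0.0.1:5102".toList "ws://host.docker.internal:5102".toList) "http://localhost:5102".toList "http://host.docker.internal:5102".toList) "http://127.0.0.1:5102".toList "http://host.docker.internal:5102".toList) "http://localhost:5103".toList "http://host.docker.internal:5103".toList) "http://127.0.0.1:5103".toList "http://host.docker.internal:5103".toList = pvScan (pvLits.map (fun l => (l, pvRepl l))) cs := by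
  rw [table_eval]
  have e1 : ∀ x, PySem.Chars.replace x ("ws://localhost:5102".toList, "ws://host.docker.internal:5102".toList).1 ("ws://localhost:5102".toList, "ws://host.docker.internal:5102".toList).2 = pvScan [("ws://localhost:5102".toList, "ws://host.docker.internal:5102".toList)] x := by
    intro x
    have h := step [] ("ws://localhost:5102".toList, "ws://host.docker.internal:5102".toList) (by decide) (by decide) (by decide) (by decide) (by decide) x
    rwa [scan_empty] at h
  have e2 : ∀ x, PySem.Chars.replace (pvScan [("ws://localhost:5102".toList, "ws://host.docker.internal:5102".toList)] x) ("ws://127.0.0.1:5102".toList, "ws://host.docker.internal:5102".toList).1 ("ws://127.0.0.1:5102".toList, "ws://host.docker.internal:5102".toList).2 = pvScan [("ws://localhost:5102".toList, "ws://host.docker.internal:5102".toList), ("ws://127.0.0.1:5102".toList, "ws://host.docker.internal:5102".toList)] x :=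
    step [("ws://localhost:5102".toList, "ws://host.docker.internal:5102".toList)] ("ws://127.0.0.1:5102".toList, "ws://host.docker.internal:5102".toList) (by decide) (by decide) (by decide) (by decide) (by decide)
  have e3 : ∀ x, PySem.Chars.replace (pvScan [("ws://localhost:5102".toList, "ws://host.docker.internal:5102".toList), ("ws://127.0.0.1:5102".toList, "ws://host.docker.internal:5102".toList)] x) ("http://localhost:5102".toList, "http://host.docker.internal:5102".toList).1 ("http://localhost:5102".toList, "http://host.docker.internal:5102".toList).2 = pvScan [("ws://localhost:5102".toList, "ws://host.docker.internal:5102".toList), ("ws://127.0.0.1:5102".toList, "ws://host.docker.internal:5102".toList), ("http://localhost:5102".toList, "http://host.docker.internal:5102".toList)] x :=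
    step [("ws://localhost:5102".toList, "ws://host.docker.internal:5102".toList), ("ws://127.0.0.1:5102".toList, "ws://host.docker.internal:5102".toList)] ("http://localhost:5102".toList, "http://host.docker.internal:5102".toList) (by decide) (by decide) (by decide) (by decide) (by decide)
  have e4 : ∀ x, PySem.Chars.replace (pvScan [("ws://localhost:5102".toList, "ws://host.docker.internal:5102".toList), ("ws://127.0.0.1:5102".toList, "ws://host.docker.internal:5102".toList), ("http://localhost:5102".toList, "http://host.docker.internal:5102".toList)] x) ("http://127.0.0.1:5102".toList, "http://host.docker.internal:5102".toList).1 ("http://127.0.0.1:5102".toList, "http://host.docker.internal:5102".toList).2 = pvScan [("ws://localhost:5102".toList, "ws://host.docker.internal:5102".toList), ("ws://127.0.0.1:5102".toList, "ws://host.docker.internal:5102".toList), ("http://localhost:5102".toList, "http://host.docker.internal:5102".toList), ("http://127.0.0.1:5102".toList, "http://host.docker.internal:5102".toList)] x :=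
    step [("ws://localhost:5102".toList, "ws://host.docker.internal:5102".toList), ("ws://127.0.0.1:5102".toList, "ws://host.docker.internal:5102".toList), ("http://localhost:5102".toList, "http://host.docker.internal:5102".toList)] ("http://127.0.0.1:5102".toList, "http://host.docker.internal:5102".toList) (by decide) (by decide) (by decide) (by decide) (by decide)
  have e5 : ∀ x, PySem.Chars.replace (pvScan [("ws://localhost:5102".toList, "ws://host.docker.internal:5102".toList), ("ws://127.0.0.1:5102".toList, "ws://host.docker.internal:5102".toList), ("http://localhost:5102".toList, "http://host.docker.internal:5102".toList), ("http://127.0.0.1:5102".toList, "http://host.docker.internal:5102".toList)] x) ("http://localhost:5103".toList, "http://host.docker.internal:5103".toList).1 ("http://localhost:5103".toList, "http://host.docker.internal:5103".toList).2 = pvScan [("ws://localhost:5102".toList, "ws://host.docker.internal:5102".toList), ("ws://127.0.0.1:5102".toList, "ws://host.docker.internal:5102".toList), ("http://localhost:5102".toList, "http://host.docker.internal:5102".toList), ("http://127.0.0.1:5102".toList, "http://host.docker.internal:5102".toList), ("http://localhost:5103".toList, "http://host.docker.internal:5103".toList)] x :=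
    step [("ws://localhost:5102".toList, "ws://host.docker.internal:5102".toList), ("ws://127.0.0.1:5102".toList, "ws://host.docker.internal:5102".toList), ("http://localhost:5102".toList, "http://host.docker.internal:5102".toList), ("http://127.0.0.1:5102".toList, "http://host.docker.internal:5102".toList)] ("http://localhost:5103".toList, "http://host.docker.internal:5103".toList) (by decide) (by decide) (by decide) (by decide) (by decide)
  have e6 : ∀ x, PySem.Chars.replace (pvScan [("ws://localhost:5102".toList, "ws://host.docker.internal:5102".toList), ("ws://127.0.0.1:5102".toList, "ws://host.docker.internal:5102".toList), ("http://localhost:5102".toList, "http://host.docker.internal:5102".toList), ("http://127.0.0.1:5102".toList, "http://host.docker.internal:5102".toList), ("http://localhost:5103".toList, "http://host.docker.internal:5103".toList)] x) ("http://127.0.0.1:5103".toList, "http://host.docker.internal:5103".toList).1 ("http://127.0.0.1:5103".toList, "http://host.docker.internal:5103".toList).2 = pvScan [("ws://localhost:5102".toList, "ws://host.docker.internal:5102".toList), ("ws://127.0.0.1:5102".toList, "ws://host.docker.internal:5102".toList), ("http://localhost:5102".toList, "http://host.docker.internal:5102".toList), ("http://127.0.0.1:5102".toList, "http://host.docker.internal:5102".toList),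 ("http://localhost:5103".toList, "http://host.docker.internal:5103".toList), ("http://127.0.0.1:5103".toList, "http://host.docker.internal:5103".toList)] x :=
    step [("ws://localhost:5102".toList, "ws://host.docker.internal:5102".toList), ("ws://127.0.0.1:5102".toList, "ws://host.docker.internal:5102".toList), ("http://localhost:5102".toList, "http://host.docker.internal:5102".toList), ("http://127.0.0.1:5102".toList, "http://host.docker.internal:5102".toList), ("http://localhost:5103".toList, "http://host.docker.internal:5103".toList)] ("http://127.0.0.1:5103".toList, "http://host.docker.internal:5103".toList) (by decide) (by decide) (by decide) (by decide) (by decide)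
  rw [e1, e2, e3, e4, e5, e6]

-- ===== VERDICT (by name: the statement is the Claim_ definition above) =====
theorem patch_userscript_for_docker_spec : Claim_equal_patch_userscript_for_docker := by
  intro raw _
  unfold Spec_patch_userscript_for_docker patch_userscript_for_docker patch_userscript_for_docker_alt
  apply String.toList_injective
  simp only [List.foldl_cons, List.foldl_nil, String.toList_append, PySem.Str.toList_replace,
    String.toList_ofList]
  rw [chain_eq]
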